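-- pv_equiv track=rewrite | github.com/jwsong98/maple-optimizer | api/service.py | _get_available_regions
-- ===== SOURCE A (Python) =====
-- from typing import Dict, Optional, List, Tuple
--
-- def _get_available_regions(force_type: str, char_level: int) -> List[int]:
--     """레벨에 따른 지역 해금 여부 반환"""
--     if force_type == "Arcane":
--         thresholds = [200, 210, 220, 225, 230, 235]
--         region_count = 6
--     else:  # Authentic
--         thresholds = [260, 265, 270, 275, 280, 285, 290]
--         region_count = 7
--
--     return [1 if char_level >= th else 0 for th in thresholds[:region_count]]
-- ===== SOURCE B (Python) =====
-- from typing import Dict, Optional, List, Tuple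
--
-- def _get_available_regions(force_type: str, char_level: int) -> List[int]:
--     """레벨에 따른 지역 해금 여부 반환"""
--     if force_type == "Arcane":
--         thresholds = [200, 210, 220, 225, 230, 235]
--     else:  # Authentic
--         thresholds = [260, 265, 270, 275, 280, 285, 290]
--     # binary-search split point (bisect_right): number of unlocked regions
--     lo, hi = 0, len(thresholds)
--     while lo < hi:
--         mid = (lo + hi) // 2
--         if thresholds[mid] <= char_level:
--             lo = mid + 1
--         else:
--             hi = mid
--     return [1] * lo + [0] * (len(thresholds) - lo)
-- ===== Notes on version B (the rewrite author's own statement) =====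
-- stated objective: alternative
-- what changed: Replaces the per-threshold comparison comprehension with a binary-search split point (bisect_right by hand) followed by two constant runs [1]*count + [0]*(n-count), exploiting that the flags form a monotone prefix of 1s.
import Mathlib
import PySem

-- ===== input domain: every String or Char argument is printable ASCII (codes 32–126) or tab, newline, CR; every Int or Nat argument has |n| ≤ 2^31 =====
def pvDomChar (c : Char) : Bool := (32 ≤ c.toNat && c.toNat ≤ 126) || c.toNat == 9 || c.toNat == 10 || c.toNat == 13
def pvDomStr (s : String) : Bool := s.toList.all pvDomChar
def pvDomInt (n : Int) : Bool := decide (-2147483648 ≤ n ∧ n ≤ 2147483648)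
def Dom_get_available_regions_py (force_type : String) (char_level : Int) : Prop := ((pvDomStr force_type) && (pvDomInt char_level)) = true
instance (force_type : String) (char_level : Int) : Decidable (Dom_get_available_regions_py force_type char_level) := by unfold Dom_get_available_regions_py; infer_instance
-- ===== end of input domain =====

-- B replaces the per-threshold comparison comprehension with a binary-search split
-- point (hand-written bisect_right) and two replicated runs; alternative structure, same O(1) cost.


-- ===== PORT A =====
def get_available_regions_py (force_type : String) (char_level : Int) : List Int :=
  let thresholds : List Int :=
    if force_type = "Arcane" then [200, 210, 220, 225, 230, 235]
    else [260, 265, 270, 275, 280, 285, 290]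
  let region_count : Nat := if force_type = "Arcane" then 6 else 7
  (thresholds.take region_count).map (fun th => if char_level ≥ th then 1 else 0)

-- ===== PORT B =====
-- hand-written bisect_right loop from Source B, as fuel recursion (fuel = hi - lo bound)
def bisectAux (ts : List Int) (x : Int) : Nat → Nat → Nat → Nat
  | 0, lo, _ => lo
  | fuel + 1, lo, hi =>
    if lo < hi then
      let mid := (lo + hi) / 2
      if ts.getD mid 0 ≤ x then bisectAux ts x fuel (mid + 1) hi
      else bisectAux ts x fuel lo mid
    else lo

def get_available_regions_py_alt (force_type : String) (char_level : Int) : List Int :=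
  let thresholds : List Int :=
    if force_type = "Arcane" then [200, 210, 220, 225, 230, 235]
    else [260, 265, 270, 275, 280, 285, 290]
  let lo := bisectAux thresholds char_level thresholds.length 0 thresholds.length
  List.replicate lo 1 ++ List.replicate (thresholds.length - lo) 0

-- ===== PRECONDITION & SPEC =====
def Spec_get_available_regions_py (force_type : String) (char_level : Int) (out : List Int) : Prop := out = get_available_regions_py_alt force_type char_level
instance (force_type : String) (char_level : Int) (out : List Int) : Decidable (Spec_get_available_regions_py force_type char_level out) := by unfold Spec_get_available_regions_py; infer_instance

-- ===== CLAIM (what is proved, stated in full; the proofs are below) =====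
def Claim_equal_get_available_regions_py : Prop := ∀ (force_type : String) (char_level : Int), Dom_get_available_regions_py force_type char_level → Spec_get_available_regions_py force_type char_level (get_available_regions_py force_type char_level)

-- ===== LEMMAS AND PROOFS =====

-- ===== VERDICT (by name: the statement is the Claim_ definition above) =====
theorem get_available_regions_py_spec : Claim_equal_get_available_regions_py := by
  intro force_type char_level _
  unfold Spec_get_available_regions_py get_available_regions_py get_available_regions_py_alt
  by_cases h : force_type = "Arcane" <;>
    simp only [h, if_pos, bisectAux, List.length_cons, List.length_nil,
      List.getD, List.take, List.map] <;>
    norm_num [bisectAux] <;>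
    split_ifs <;> first | rfl | omega
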